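-- pv_equiv track=rewrite | github.com/Tracyold/cuttingcorners | frontend/scripts/inject.py | tokenize_list
-- ===== SOURCE A (Python) =====
-- WORDS = [
--     ('dtail', 'Detail'),
--     ('front', 'frontend'),
--     ('port',  'portfolio'),
--     ('usrs',  'users'),
--     ('ind',  'index'),
--     ('comp',  'components'),
--     ('inq',   'Inquiry'),
--     ('inv',   'Invoice'),
--     ('res',   'Results'),
--     ('ord',   'Order'),
--     ('wig',   'Widget'),
--     ('mod',   'Modal'),
--     ('acc',   'account'),
--     ('shp',   'shop'),
--     ('int',   'intro'),
--     ('scr',   'screen'),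
--     ('sty',   'styles'),
--     ('lib',   'lib'),
--     ('hook',  'hooks'),
--     ('CP',    'ChatPanel'),
--     ('wiz',   'Wizard'),   # capital W
--     ('wz',    'wizard'),   # lowercase
--     ('pg',    'pages'),
--     ('fs',    'feasibility'),
--     ('ck',    'check'),
-- ]
--
-- def tokenize_list(seg: str) -> list:
--     """Greedily expand a shorthand segment into a list of full words."""
--     result, s = [], seg
--     while s:
--         matched = False
--         for short, full in WORDS:
--             if s.startswith(short):
--                 result.append(full); s = s[len(short):]; matched = True; break
--         if not matched:
--             result.append(s[0]); s = s[1:]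
--     return result
-- ===== SOURCE B (Python) =====
-- WORDS = [
--     ('dtail', 'Detail'),
--     ('front', 'frontend'),
--     ('port',  'portfolio'),
--     ('usrs',  'users'),
--     ('ind',  'index'),
--     ('comp',  'components'),
--     ('inq',   'Inquiry'),
--     ('inv',   'Invoice'),
--     ('res',   'Results'),
--     ('ord',   'Order'),
--     ('wig',   'Widget'),
--     ('mod',   'Modal'),
--     ('acc',   'account'),
--     ('shp',   'shop'),
--     ('int',   'intro'),
--     ('scr',   'screen'),
--     ('sty',   'styles'),
--     ('lib',   'lib'),
--     ('hook',  'hooks'),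
--     ('CP',    'ChatPanel'),
--     ('wiz',   'Wizard'),
--     ('wz',    'wizard'),
--     ('pg',    'pages'),
--     ('fs',    'feasibility'),
--     ('ck',    'check'),
-- ]
--
-- # First-character index: only shorthands starting with a given character are
-- # candidates at a position, in their original WORDS order.
-- INDEX = {}
-- for _short, _full in WORDS:
--     INDEX[_short[0]] = INDEX.get(_short[0], []) + [(_short, _full)]
--
--
-- def tokenize_list(seg: str) -> list:
--     """Greedily expand a shorthand segment into a list of full words."""
--     out = []
--     i, n = 0, len(seg)
--     while i < n:
--         for short, full in INDEX.get(seg[i], []):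
--             if seg.startswith(short, i):
--                 out.append(full)
--                 i += len(short)
--                 break
--         else:
--             out.append(seg[i])
--             i += 1
--     return out
-- ===== Notes on version B (the rewrite author's own statement) =====
-- stated objective: faster
-- what changed: B replaces A's slicing while-loop that scans the full 25-entry WORDS list at every position with an index-based single pass over a first-character bucket dict built once, so no string slices are created and only same-first-char shorthands are tried at each position.
import Mathlib
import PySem

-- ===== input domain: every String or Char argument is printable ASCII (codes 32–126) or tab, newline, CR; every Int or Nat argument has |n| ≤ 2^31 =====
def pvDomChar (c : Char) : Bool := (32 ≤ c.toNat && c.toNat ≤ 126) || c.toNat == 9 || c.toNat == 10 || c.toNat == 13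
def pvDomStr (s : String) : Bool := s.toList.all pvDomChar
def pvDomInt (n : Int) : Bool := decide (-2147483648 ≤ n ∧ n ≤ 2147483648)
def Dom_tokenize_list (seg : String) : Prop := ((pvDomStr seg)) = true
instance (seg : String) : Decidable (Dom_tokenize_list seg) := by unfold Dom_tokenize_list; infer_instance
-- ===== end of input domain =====

-- B replaces A's slicing while-loop that scans ALL of WORDS at every position by an
-- index-based scan with a first-character bucket dict (only same-first-char shorthands
-- are candidates, no string slicing); objective: faster (constant factor / no copies).

def pvWORDS : List (String × String) :=
  [("dtail","Detail"),("front","frontend"),("port","portfolio"),("usrs","users"),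
   ("ind","index"),("comp","components"),("inq","Inquiry"),("inv","Invoice"),
   ("res","Results"),("ord","Order"),("wig","Widget"),("mod","Modal"),
   ("acc","account"),("shp","shop"),("int","intro"),("scr","screen"),
   ("sty","styles"),("lib","lib"),("hook","hooks"),("CP","ChatPanel"),
   ("wiz","Wizard"),("wz","wizard"),("pg","pages"),("fs","feasibility"),("ck","check")]

-- ===== PORT A =====
-- inner 'for short, full in WORDS: if s.startswith(short): … break'
def pvFindA (ws : List (String × String)) (s : List Char) : Option (String × String) :=
  match ws with
  | [] => none
  | w :: rest => if PySem.Chars.startswith s w.1.toList then some w else pvFindA rest s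

-- termination facts for the while loop (cited by decreasing_by)
theorem pvFindA_mem {ws : List (String × String)} {s : List Char} {w : String × String}
    (h : pvFindA ws s = some w) : w ∈ ws := by
  induction ws with
  | nil => simp [pvFindA] at h
  | cons x rest ih =>
    simp only [pvFindA] at h
    split at h
    · simp at h; simp [h]
    · simp [ih h]

theorem pvWORDS_nonempty : ∀ w ∈ pvWORDS, 1 ≤ w.1.toList.length := by decide

-- 'while s: … matched … if not matched: result.append(s[0]); s = s[1:]'
def pvLoopA (s : List Char) (result : List String) : List String :=
  if hs : s.length = 0 then result
  else
    match hf : pvFindA pvWORDS s with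
    | some w => pvLoopA (s.drop w.1.toList.length) (result ++ [w.2])
    | none => pvLoopA (s.drop 1) (result ++ [String.ofList [s.headI]])
termination_by s.length
decreasing_by
  · have h1 := pvWORDS_nonempty _ (pvFindA_mem hf)
    simp only [List.length_drop]; omega
  · simp only [List.length_drop]; omega

def tokenize_list (seg : String) : List String := pvLoopA seg.toList []

-- ===== PORT B =====
-- module-level 'INDEX[short[0]] = INDEX.get(short[0], []) + [(short, full)]'
def pvIndex : PySem.Dict Char (List (String × String)) :=
  pvWORDS.foldl (fun d w => d.modify w.1.toList.headI [] (· ++ [w])) PySem.Dict.empty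

-- 'for short, full in INDEX.get(seg[i], []): if seg.startswith(short, i): … break'
-- (seg.startswith(short, i) ported by hand as a prefix test on the suffix at i; exact for 0 ≤ i)
def pvFindB (cands : List (String × String)) (cs : List Char) (i : Nat) : Option (String × String) :=
  match cands with
  | [] => none
  | w :: rest => if PySem.Chars.startswith (cs.drop i) w.1.toList then some w else pvFindB rest cs i

-- termination facts for B's while loop (cited by decreasing_by); proved below the claim
-- block would be too late: the port cites them.
theorem pvFindB_mem {cands : List (String × String)} {cs : List Char} {i : Nat}
    {w : String × String} (h : pvFindB cands cs i = some w) : w ∈ cands := by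
  induction cands with
  | nil => simp [pvFindB] at h
  | cons x rest ih =>
    simp only [pvFindB] at h
    split at h
    · simp at h; simp [h]
    · simp [ih h]

theorem pvIndex_getD (c : Char) :
    pvIndex.getD c [] = pvWORDS.filter (fun w => w.1.toList.headI == c) := by
  have h : pvIndex
      = (pvWORDS.map (fun w => (w.1.toList.headI, w))).foldl
          (fun d p => d.modify p.1 [] (· ++ [p.2])) PySem.Dict.empty := by
    rw [List.foldl_map]
    rfl
  rw [h, PySem.Dict.getD_foldl_modify_append, PySem.Dict.getD_empty]
  rw [List.filter_map, List.map_map]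
  simp [Function.comp_def]

theorem pvIndex_getD_nonempty {c : Char} {w : String × String}
    (h : w ∈ pvIndex.getD c []) : 1 ≤ w.1.toList.length := by
  rw [pvIndex_getD] at h
  exact pvWORDS_nonempty _ (List.mem_filter.mp h).1

-- 'i, n = 0, len(seg); while i < n: …'
def pvLoopB (cs : List Char) (i : Nat) (out : List String) : List String :=
  if h : i < cs.length then
    match hf : pvFindB (pvIndex.getD cs[i] []) cs i with
    | some w => pvLoopB cs (i + w.1.toList.length) (out ++ [w.2])
    | none => pvLoopB cs (i + 1) (out ++ [String.ofList [cs[i]]])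
  else out
termination_by cs.length - i
decreasing_by
  · have h1 := pvIndex_getD_nonempty (pvFindB_mem hf)
    omega
  · omega

def tokenize_list_alt (seg : String) : List String := pvLoopB seg.toList 0 []

-- ===== PRECONDITION & SPEC =====
def Spec_tokenize_list (seg : String) (out : List String) : Prop := out = tokenize_list_alt seg
instance (seg : String) (out : List String) : Decidable (Spec_tokenize_list seg out) := by unfold Spec_tokenize_list; infer_instance

-- ===== CLAIM (what is proved, stated in full; the proofs are below) =====
def Claim_equal_tokenize_list : Prop := ∀ (seg : String), Dom_tokenize_list seg → Spec_tokenize_list seg (tokenize_list seg)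

-- ===== LEMMAS AND PROOFS =====

-- unfolding equations for the two while loops
theorem pvLoopA_nil (result : List String) : pvLoopA [] result = result := by
  rw [pvLoopA]; simp

theorem pvLoopA_some {s : List Char} {w : String × String} (hs : s ≠ [])
    (hf : pvFindA pvWORDS s = some w) (result : List String) :
    pvLoopA s result = pvLoopA (s.drop w.1.toList.length) (result ++ [w.2]) := by
  rw [pvLoopA]
  have hs' : ¬ s.length = 0 := by simpa using hs
  simp only [dif_neg hs']
  split
  · rename_i w' hf'
    rw [hf] at hf'; cases hf'; rfl
  · rename_i hf'
    rw [hf] at hf'; cases hf'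

theorem pvLoopA_none {s : List Char} (hs : s ≠ [])
    (hf : pvFindA pvWORDS s = none) (result : List String) :
    pvLoopA s result = pvLoopA (s.drop 1) (result ++ [String.ofList [s.headI]]) := by
  rw [pvLoopA]
  have hs' : ¬ s.length = 0 := by simpa using hs
  simp only [dif_neg hs']
  split
  · rename_i w' hf'
    rw [hf] at hf'; cases hf'
  · rfl

theorem pvLoopB_stop {cs : List Char} {i : Nat} (h : ¬ i < cs.length) (out : List String) :
    pvLoopB cs i out = out := by
  rw [pvLoopB]; simp [h]

theorem pvLoopB_some {cs : List Char} {i : Nat} {w : String × String} (h : i < cs.length)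
    (hf : pvFindB (pvIndex.getD cs[i] []) cs i = some w) (out : List String) :
    pvLoopB cs i out = pvLoopB cs (i + w.1.toList.length) (out ++ [w.2]) := by
  rw [pvLoopB]
  simp only [dif_pos h]
  split
  · rename_i w' hf'
    rw [hf] at hf'; cases hf'; rfl
  · rename_i hf'
    rw [hf] at hf'; cases hf'

theorem pvLoopB_none {cs : List Char} {i : Nat} (h : i < cs.length)
    (hf : pvFindB (pvIndex.getD cs[i] []) cs i = none) (out : List String) :
    pvLoopB cs i out = pvLoopB cs (i + 1) (out ++ [String.ofList [cs[i]]]) := by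
  rw [pvLoopB]
  simp only [dif_pos h]
  split
  · rename_i w' hf'
    rw [hf] at hf'; cases hf'
  · rfl

-- B's inner scan is A's inner scan on the suffix at i
theorem pvFindB_eq_findA (cands : List (String × String)) (cs : List Char) (i : Nat) :
    pvFindB cands cs i = pvFindA cands (cs.drop i) := by
  induction cands with
  | nil => rfl
  | cons x rest ih => simp only [pvFindB, pvFindA, ih]

-- restricting the scan to shorthands whose first character matches loses no match
theorem pvFindA_filter (ws : List (String × String)) (hne : ∀ w ∈ ws, 1 ≤ w.1.toList.length)
    (c : Char) (rest : List Char) :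
    pvFindA (ws.filter (fun w => w.1.toList.headI == c)) (c :: rest) = pvFindA ws (c :: rest) := by
  induction ws with
  | nil => rfl
  | cons x xs ih =>
    have hx : 1 ≤ x.1.toList.length := hne x (by simp)
    have hxs : ∀ w ∈ xs, 1 ≤ w.1.toList.length := fun w hw => hne w (by simp [hw])
    by_cases hc : x.1.toList.headI = c
    · simp only [List.filter_cons, hc, beq_self_eq_true, if_pos, pvFindA]
      split
      · rfl
      · exact ih hxs
    · have hnp : ¬ PySem.Chars.startswith (c :: rest) x.1.toList = true := by
        intro hcon
        have hp := (PySem.Chars.startswith_iff _ _).mp hcon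
        cases hxl : x.1.toList with
        | nil => simp [hxl] at hx
        | cons a t =>
          rw [hxl] at hc hp
          obtain ⟨u, hu⟩ := hp
          simp only [List.cons_append, List.cons.injEq] at hu
          exact hc (by simp [List.headI, hu.1])
      have hcb : ¬ (x.1.toList.headI == c) = true := by simpa using hc
      simp only [List.filter_cons, if_neg hcb, pvFindA, if_neg hnp]
      exact ih hxs

theorem pvLoop_eq (cs : List Char) (i : Nat) (out : List String) :
    pvLoopB cs i out = pvLoopA (cs.drop i) out := by
  by_cases hlt : i < cs.length
  · have hdrop : cs.drop i = cs[i] :: cs.drop (i + 1) := List.drop_eq_getElem_cons hlt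
    have hne : cs.drop i ≠ [] := by simp only [ne_eq, List.drop_eq_nil_iff]; omega
    have hfind : pvFindB (pvIndex.getD cs[i] []) cs i = pvFindA pvWORDS (cs.drop i) := by
      rw [pvFindB_eq_findA, pvIndex_getD, hdrop]
      exact pvFindA_filter pvWORDS pvWORDS_nonempty cs[i] (cs.drop (i+1))
    rcases hf : pvFindA pvWORDS (cs.drop i) with _ | w
    · have hh : (cs.drop i).headI = cs[i] := by rw [hdrop]; rfl
      rw [pvLoopB_none hlt (hfind.trans hf) out, pvLoopA_none hne hf out,
          List.drop_drop, hh]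
      have := pvLoop_eq cs (i + 1) (out ++ [String.ofList [cs[i]]])
      simpa [Nat.add_comm] using this
    · have hk := pvWORDS_nonempty _ (pvFindA_mem hf)
      rw [pvLoopB_some hlt (hfind.trans hf) out, pvLoopA_some hne hf out, List.drop_drop]
      have := pvLoop_eq cs (i + w.1.toList.length) (out ++ [w.2])
      simpa [Nat.add_comm] using this
  · rw [pvLoopB_stop hlt out, List.drop_eq_nil_of_le (by omega), pvLoopA_nil]
termination_by cs.length - i
decreasing_by
  · omega
  · have := pvWORDS_nonempty _ (pvFindA_mem hf); omega

-- ===== VERDICT (by name: the statement is the Claim_ definition above) =====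
theorem tokenize_list_spec : Claim_equal_tokenize_list := by
  intro seg _
  unfold Spec_tokenize_list tokenize_list tokenize_list_alt
  rw [pvLoop_eq seg.toList 0 []]
  rfl
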